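-- pv_equiv track=rewrite | github.com/mm-user1/merlin | src/core/optuna_engine.py | _build_categorical_combinations
-- ===== SOURCE A (Python) =====
-- import itertools
-- from typing import Any, Dict, List, Optional, Set, Tuple, Union
--
-- def _build_categorical_combinations(
--     categorical_axes: List[Tuple[str, List[Any]]]
-- ) -> List[Dict[str, Any]]:
--     if not categorical_axes:
--         return [{}]
--     axis_names = [name for name, _ in categorical_axes]
--     axis_choices = [choices for _, choices in categorical_axes]
--     combinations: List[Dict[str, Any]] = []
--     for values in itertools.product(*axis_choices):
--         combinations.append(dict(zip(axis_names, values)))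
--     return combinations
-- ===== SOURCE B (Python) =====
-- from typing import Any, Dict, List, Tuple
--
-- def _build_categorical_combinations(
--     categorical_axes: List[Tuple[str, List[Any]]]
-- ) -> List[Dict[str, Any]]:
--     result: List[Dict[str, Any]] = [{}]
--     for name, choices in categorical_axes:
--         result = [{**d, name: c} for d in result for c in choices]
--     return result
-- ===== Notes on version B (the rewrite author's own statement) =====
-- stated objective: simpler
-- what changed: Replaces itertools.product over pre-split name/choice lists plus dict(zip(...)) per tuple with a single incremental fold: start from [{}] and extend every partial dict with each choice of the current axis, which also removes the special case for empty input.
import Mathlib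
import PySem

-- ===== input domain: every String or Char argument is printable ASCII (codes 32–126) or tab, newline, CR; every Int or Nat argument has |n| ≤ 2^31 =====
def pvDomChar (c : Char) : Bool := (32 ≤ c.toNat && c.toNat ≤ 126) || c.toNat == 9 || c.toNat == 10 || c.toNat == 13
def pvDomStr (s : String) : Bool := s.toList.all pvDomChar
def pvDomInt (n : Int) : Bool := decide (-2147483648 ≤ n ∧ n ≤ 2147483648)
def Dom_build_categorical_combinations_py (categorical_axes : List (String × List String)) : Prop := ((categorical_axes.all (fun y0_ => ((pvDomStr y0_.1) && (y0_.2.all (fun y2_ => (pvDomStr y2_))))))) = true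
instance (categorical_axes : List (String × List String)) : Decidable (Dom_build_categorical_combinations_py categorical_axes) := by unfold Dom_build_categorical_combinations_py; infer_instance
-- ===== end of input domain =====

-- B replaces itertools.product + dict(zip(...)) with an incremental fold extending partial dicts axis by axis (simpler: no empty-input special case).

-- ===== PORT A =====
-- itertools.product(*axis_choices) over a list of choice lists, rightmost axis fastest.
def pvProduct (ls : List (List String)) : List (List String) :=
  match ls with
  | [] => [[]]
  | xs :: rest => xs.flatMap (fun x => (pvProduct rest).map (fun t => x :: t))

def build_categorical_combinations_py (categorical_axes : List (String × List String)) : List (List (String × String)) :=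
  if categorical_axes = [] then [(PySem.Dict.empty (κ := String) (ν := String)).items]
  else
    let axis_names := categorical_axes.map (fun p => p.1)
    let axis_choices := categorical_axes.map (fun p => p.2)
    (pvProduct axis_choices).foldl
      (fun acc values => acc ++ [(PySem.Dict.ofList (axis_names.zip values)).items]) []

-- ===== PORT B =====
def build_categorical_combinations_py_alt (categorical_axes : List (String × List String)) : List (List (String × String)) :=
  (categorical_axes.foldl
      (fun result nc => result.flatMap (fun d => nc.2.map (fun c => d.insert nc.1 c)))
      [PySem.Dict.empty (κ := String) (ν := String)]).map (fun d => d.items)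

-- ===== PRECONDITION & SPEC =====
def Spec_build_categorical_combinations_py (categorical_axes : List (String × List String)) (out : List (List (String × String))) : Prop := out = build_categorical_combinations_py_alt categorical_axes
instance (categorical_axes : List (String × List String)) (out : List (List (String × String))) : Decidable (Spec_build_categorical_combinations_py categorical_axes out) := by unfold Spec_build_categorical_combinations_py; infer_instance

-- ===== CLAIM (what is proved, stated in full; the proofs are below) =====
def Claim_equal_build_categorical_combinations_py : Prop := ∀ (categorical_axes : List (String × List String)), Dom_build_categorical_combinations_py categorical_axes → Spec_build_categorical_combinations_py categorical_axes (build_categorical_combinations_py categorical_axes)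

-- ===== LEMMAS AND PROOFS =====

-- B's fold, started from any list of partial dicts, equals the product of the remaining
-- axes' choices mapped through sequential insertion of the zipped (name, value) pairs.
theorem pv_fold_eq_product (axes : List (String × List String))
    (acc : List (PySem.Dict String String)) :
    axes.foldl (fun result nc => result.flatMap (fun d => nc.2.map (fun c => d.insert nc.1 c))) acc
      = acc.flatMap (fun d =>
          (pvProduct (axes.map (fun p => p.2))).map
            (fun vs => d.update ((axes.map (fun p => p.1)).zip vs))) := by
  induction axes generalizing acc with
  | nil =>
      simp [pvProduct, PySem.Dict.update]
  | cons nc rest ih =>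
      simp only [List.foldl_cons, ih, pvProduct, List.map_cons, List.map_flatMap,
        List.flatMap_map, List.map_map, List.flatMap_assoc]
      congr 1

theorem build_categorical_combinations_py_alt_eq (categorical_axes : List (String × List String)) :
    build_categorical_combinations_py_alt categorical_axes
      = (pvProduct (categorical_axes.map (fun p => p.2))).map
          (fun vs => (PySem.Dict.ofList ((categorical_axes.map (fun p => p.1)).zip vs)).items) := by
  unfold build_categorical_combinations_py_alt
  rw [pv_fold_eq_product]
  simp [PySem.Dict.ofList, List.map_map, Function.comp]

-- ===== VERDICT (by name: the statement is the Claim_ definition above) =====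
theorem build_categorical_combinations_py_spec : Claim_equal_build_categorical_combinations_py := by
  intro categorical_axes _
  unfold Spec_build_categorical_combinations_py
  rw [build_categorical_combinations_py_alt_eq]
  unfold build_categorical_combinations_py
  split_ifs with h
  · subst h; simp [pvProduct, PySem.Dict.ofList, PySem.Dict.update]
  · rw [PySem.List.foldl_append_singleton_eq_map]; simp
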